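-- pv_equiv track=rewrite | github.com/Moskize91/logseq2obsidian | src/obsidian_formatter.py | _normalize_list_indent
-- ===== SOURCE A (Python) =====
-- def _normalize_list_indent(line: str) -> str:
--     """规范化列表项的缩进"""
--     # 计算前导空白的数量
--     stripped = line.lstrip()
--     leading_whitespace = line[:len(line) - len(stripped)]
--
--     # 计算缩进级别：制表符按1级计算，每2个空格按1级计算
--     indent_level = 0
--     i = 0
--     while i < len(leading_whitespace):
--         char = leading_whitespace[i]
--         if char == '\t':
--             indent_level += 1
--             i += 1
--         elif char == ' ':
--             # 连续的空格按2个为一级缩进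
--             space_count = 0
--             while i < len(leading_whitespace) and leading_whitespace[i] == ' ':
--                 space_count += 1
--                 i += 1
--             indent_level += space_count // 2  # 每2个空格算1级
--         else:
--             i += 1
--
--     # 生成规范化的缩进（每级2个空格）
--     normalized_indent = '  ' * indent_level
--
--     return normalized_indent + stripped
-- ===== SOURCE B (Python) =====
-- def _normalize_list_indent(line: str) -> str:
--     """规范化列表项的缩进"""
--     # Single flat automaton over the line: no strip/slice, no run lengths, no
--     # division — a tab, or a greedily consumed pair of spaces, is one level;
--     # any other whitespace (including an unpaired trailing space of a run)
--     # is skipped.  Stops at the first non-whitespace character.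
--     i = 0
--     level = 0
--     n = len(line)
--     while i < n and line[i].isspace():
--         if line[i] == '\t':
--             level += 1
--             i += 1
--         elif line[i] == ' ' and i + 1 < n and line[i + 1] == ' ':
--             level += 1
--             i += 2
--         else:
--             i += 1
--     return '  ' * level + line[i:]
-- ===== Notes on version B (the rewrite author's own statement) =====
-- stated objective: simpler
-- what changed: Replaces A's lstrip+slice prefix extraction and nested run-counting loop with //2 arithmetic by a single flat greedy automaton over the line: a tab or a greedily consumed pair of adjacent spaces is one level, any other whitespace is skipped, and it stops at the first non-whitespace character.
import Mathlib
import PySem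

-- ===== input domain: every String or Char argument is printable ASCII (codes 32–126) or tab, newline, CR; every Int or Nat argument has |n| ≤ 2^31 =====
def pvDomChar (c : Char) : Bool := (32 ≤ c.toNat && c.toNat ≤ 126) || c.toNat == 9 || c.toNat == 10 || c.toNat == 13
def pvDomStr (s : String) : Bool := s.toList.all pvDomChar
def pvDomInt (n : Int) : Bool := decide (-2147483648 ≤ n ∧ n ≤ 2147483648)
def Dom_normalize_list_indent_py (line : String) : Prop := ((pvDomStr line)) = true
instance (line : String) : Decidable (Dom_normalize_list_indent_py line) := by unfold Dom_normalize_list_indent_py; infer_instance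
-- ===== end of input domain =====

-- B replaces A's lstrip/slice prefix extraction and nested run-counting loop (with //2)
-- by one flat greedy automaton: a tab, or a greedily consumed pair of adjacent spaces,
-- is one level; other whitespace is skipped; objective: simpler.

-- ===== PORT A =====
-- A's inner `while … == ' '` loop: count the leading spaces, return (space_count, rest)
def pvA_spaces : List Char → Nat × List Char
  | [] => (0, [])
  | c :: rest =>
    if c = ' ' then
      let p := pvA_spaces rest
      (p.1 + 1, p.2)
    else (0, c :: rest)

theorem pvA_spaces_len (l : List Char) : (pvA_spaces l).2.length ≤ l.length := by
  induction l with
  | nil => simp [pvA_spaces]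
  | cons c rest ih =>
    simp only [pvA_spaces]
    split
    · simpa using Nat.le_succ_of_le ih
    · simp

-- A's outer `while i < len(leading_whitespace)` loop computing indent_level
def pvA_loop : List Char → Int
  | [] => 0
  | c :: rest =>
    if c = '\t' then 1 + pvA_loop rest
    else if c = ' ' then
      let p := pvA_spaces rest
      (((p.1 + 1) / 2 : Nat) : Int) + pvA_loop p.2
    else pvA_loop rest
termination_by l => l.length
decreasing_by
  all_goals (have := pvA_spaces_len rest; simp only [List.length_cons]; omega)

def normalize_list_indent_py (line : String) : String :=
  let stripped := PySem.Str.lstrip line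
  let leading_whitespace := PySem.Str.slice line none (some (PySem.Str.len line - PySem.Str.len stripped))
  let indent_level : Int := pvA_loop leading_whitespace.toList
  let normalized_indent := String.ofList (PySem.List.pyRepeat "  ".toList indent_level)
  normalized_indent ++ stripped

-- ===== PORT B =====
-- B's `while i < n and line[i].isspace()` loop, scanning the list left to right
def pvB_go (cs : List Char) (level : Nat) : List Char :=
  match cs with
  | [] => PySem.List.pyRepeat "  ".toList (level : Int)
  | c :: rest =>
    if PySem.Chars.isspace c then
      if c = '\t' then pvB_go rest (level + 1)
      else if c = ' ' ∧ rest.head? = some ' ' then pvB_go rest.tail (level + 1)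
      else pvB_go rest level
    else PySem.List.pyRepeat "  ".toList (level : Int) ++ (c :: rest)
termination_by cs.length
decreasing_by
  · simp
  · cases rest <;> simp
  · simp

def normalize_list_indent_py_alt (line : String) : String :=
  String.ofList (pvB_go line.toList 0)

-- ===== PRECONDITION & SPEC =====
def Spec_normalize_list_indent_py (line : String) (out : String) : Prop := out = normalize_list_indent_py_alt line
instance (line : String) (out : String) : Decidable (Spec_normalize_list_indent_py line out) := by unfold Spec_normalize_list_indent_py; infer_instance

-- ===== CLAIM (what is proved, stated in full; the proofs are below) =====
def Claim_equal_normalize_list_indent_py : Prop := ∀ (line : String), Dom_normalize_list_indent_py line → Spec_normalize_list_indent_py line (normalize_list_indent_py line)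

-- ===== LEMMAS AND PROOFS =====

theorem pvA_spaces_eq (l : List Char) :
    pvA_spaces l = ((l.takeWhile (· == ' ')).length, l.dropWhile (· == ' ')) := by
  induction l with
  | nil => simp [pvA_spaces]
  | cons c rest ih =>
    simp only [pvA_spaces]
    by_cases hc : c = ' '
    · subst hc
      simp [ih]
    · have hb : (c == ' ') = false := by simp [hc]
      simp [hb, hc]

-- contribution of a space-headed suffix, via the inner space-counting loop
theorem pvA_loop_space (l : List Char) :
    pvA_loop (' ' :: l)
      = ((((l.takeWhile (· == ' ')).length + 1) / 2 : Nat) : Int)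
          + pvA_loop (l.dropWhile (· == ' ')) := by
  rw [pvA_loop]
  simp [pvA_spaces_eq]

-- one level per greedily consumed pair of spaces
theorem pvA_loop_pair (l : List Char) :
    pvA_loop (' ' :: ' ' :: l) = 1 + pvA_loop l := by
  rw [pvA_loop_space]
  simp only [List.takeWhile_cons, List.dropWhile_cons,
    show ((' ' : Char) == ' ') = true by decide, if_true, List.length_cons]
  rcases l with _ | ⟨d, l'⟩
  · norm_num
  · by_cases hd : d = ' '
    · subst hd
      rw [pvA_loop_space]
      simp only [List.takeWhile_cons, List.dropWhile_cons,
        show ((' ' : Char) == ' ') = true by decide, if_true, List.length_cons]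
      omega
    · have hb : (d == ' ') = false := by simp [hd]
      simp only [List.takeWhile_cons, List.dropWhile_cons, hb, Bool.false_eq_true, if_false,
        List.length_nil]
      norm_num

-- a lone space (not followed by a space) contributes nothing
theorem pvA_loop_lone (l : List Char) (h : l.head? ≠ some ' ') :
    pvA_loop (' ' :: l) = pvA_loop l := by
  rw [pvA_loop_space]
  have htw : l.takeWhile (· == ' ') = [] := by
    rcases l with _ | ⟨d, l'⟩
    · simp
    · have hd : (d == ' ') = false := by
        simp only [List.head?_cons, ne_eq, Option.some.injEq] at h
        simp [h]
      simp [hd]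
  have hdw : l.dropWhile (· == ' ') = l := by
    rcases l with _ | ⟨d, l'⟩
    · simp
    · have hd : (d == ' ') = false := by
        simp only [List.head?_cons, ne_eq, Option.some.injEq] at h
        simp [h]
      simp [hd]
  rw [htw, hdw]
  norm_num

set_option maxHeartbeats 1600000 in
-- main invariant: B's automaton = repeat(level + A's loop on the whitespace prefix) ++ rest
theorem pvB_go_eq (cs : List Char) (level : Nat) :
    pvB_go cs level
      = PySem.List.pyRepeat "  ".toList ((level : Int) + pvA_loop (cs.takeWhile PySem.Chars.isspace))
          ++ cs.dropWhile PySem.Chars.isspace := by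
  induction hn : cs.length using Nat.strong_induction_on generalizing cs level with
  | _ n ih =>
  subst hn
  match cs with
  | [] => simp [pvB_go, pvA_loop]
  | c :: rest =>
    by_cases hws : PySem.Chars.isspace c = true
    · rw [pvB_go, if_pos hws]
      by_cases ht : c = '\t'
      · subst ht
        rw [if_pos rfl, ih rest.length (by simp) rest (level + 1) rfl]
        simp only [List.takeWhile_cons, hws, List.dropWhile_cons, if_true]
        rw [pvA_loop, if_pos rfl]
        congr 2
        push_cast
        ring
      · rw [if_neg ht]
        by_cases hp : c = ' ' ∧ rest.head? = some ' '
        · rw [if_pos hp]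
          obtain ⟨hc, hh⟩ := hp
          subst hc
          rcases rest with _ | ⟨d, rest'⟩
          · simp at hh
          · have hd : d = ' ' := by simpa using hh
            subst hd
            rw [List.tail_cons, ih rest'.length (by simp) rest' (level + 1) rfl]
            simp only [List.takeWhile_cons, List.dropWhile_cons, hws, if_true]
            rw [pvA_loop_pair]
            congr 2
            push_cast
            ring
        · rw [if_neg hp, ih rest.length (by simp) rest level rfl]
          simp only [List.takeWhile_cons, List.dropWhile_cons, hws, if_true]
          by_cases hc : c = ' '
          · subst hc
            have hh : rest.head? ≠ some ' ' := fun h => hp ⟨rfl, h⟩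
            have hh' : (rest.takeWhile PySem.Chars.isspace).head? ≠ some ' ' := by
              rcases rest with _ | ⟨d, rest'⟩
              · simp
              · simp only [List.head?_cons, ne_eq, Option.some.injEq] at hh
                simp only [List.takeWhile_cons]
                by_cases hd : PySem.Chars.isspace d = true
                · simp [hd, hh]
                · simp [hd]
            rw [pvA_loop_lone _ hh']
          · rw [pvA_loop, if_neg ht, if_neg hc]
    · rw [pvB_go, if_neg hws]
      simp only [List.takeWhile_cons, List.dropWhile_cons, hws, Bool.false_eq_true, if_false]
      simp [pvA_loop]

-- ===== VERDICT (by name: the statement is the Claim_ definition above) =====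
set_option maxHeartbeats 400000 in
theorem normalize_list_indent_py_spec : Claim_equal_normalize_list_indent_py := by
  intro line _
  unfold Spec_normalize_list_indent_py normalize_list_indent_py normalize_list_indent_py_alt
  rw [pvB_go_eq]
  have hstr : (PySem.Str.lstrip line).toList = line.toList.dropWhile PySem.Chars.isspace := by
    simp [PySem.Str.lstrip, PySem.Chars.lstrip]
  have hlen : PySem.Str.len line - PySem.Str.len (PySem.Str.lstrip line)
      = ((line.toList.takeWhile PySem.Chars.isspace).length : Int) := by
    simp only [PySem.Str.len_eq, hstr]
    have hl := congrArg List.length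
      (List.takeWhile_append_dropWhile (p := PySem.Chars.isspace) (l := line.toList))
    simp only [List.length_append] at hl
    have hsl : line.toList.length = line.length := by simp
    omega
  have hlw : (PySem.Str.slice line none
        (some (PySem.Str.len line - PySem.Str.len (PySem.Str.lstrip line)))).toList
      = line.toList.takeWhile PySem.Chars.isspace := by
    rw [hlen]
    simp only [PySem.Str.toList_slice, PySem.Chars.slice_eq_listSlice,
      PySem.List.slice_to_natCast]
    exact (List.prefix_iff_eq_take.mp (List.takeWhile_prefix _)).symm
  have h2 : PySem.Str.lstrip line
      = String.ofList (line.toList.dropWhile PySem.Chars.isspace) := by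
    rw [← hstr, String.ofList_toList]
  simp only [hlw]
  rw [h2, ← String.ofList_append]
  norm_num
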